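-- pv_equiv track=rewrite | github.com/need-singularity/sylvian-singularity | .shared/calc/dfs_n6_composition_miner.py | sieve_Omega
-- ===== SOURCE A (Python) =====
-- def sieve_Omega(limit):
--     O = [0] * (limit + 1)
--     spf = list(range(limit + 1))
--     for i in range(2, int(limit**0.5) + 1):
--         if spf[i] == i:
--             for j in range(i*i, limit + 1, i):
--                 if spf[j] == j:
--                     spf[j] = i
--     for n in range(2, limit + 1):
--         m = n
--         while m > 1:
--             O[n] += 1
--             m //= spf[m]
--     return O
-- ===== SOURCE B (Python) =====
-- def sieve_Omega(limit):
--     O = [0] * (limit + 1)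
--     spf = list(range(limit + 1))
--     i = 2
--     while i * i <= limit:
--         if spf[i] == i:
--             for j in range(i * i, limit + 1, i):
--                 if spf[j] == j:
--                     spf[j] = i
--         i += 1
--     for n in range(2, limit + 1):
--         O[n] = O[n // spf[n]] + 1
--     return O
-- ===== Notes on version B (the rewrite author's own statement) =====
-- stated objective: faster
-- what changed: B replaces A's per-n re-factorization while-loop (which divides each n all the way down again) by a dynamic-programming recurrence that sets each count to one more than the already-computed count of the cofactor n // spf[n], and drives the sieve with an integer i*i <= limit loop instead of a float sqrt bound.
import Mathlib
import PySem

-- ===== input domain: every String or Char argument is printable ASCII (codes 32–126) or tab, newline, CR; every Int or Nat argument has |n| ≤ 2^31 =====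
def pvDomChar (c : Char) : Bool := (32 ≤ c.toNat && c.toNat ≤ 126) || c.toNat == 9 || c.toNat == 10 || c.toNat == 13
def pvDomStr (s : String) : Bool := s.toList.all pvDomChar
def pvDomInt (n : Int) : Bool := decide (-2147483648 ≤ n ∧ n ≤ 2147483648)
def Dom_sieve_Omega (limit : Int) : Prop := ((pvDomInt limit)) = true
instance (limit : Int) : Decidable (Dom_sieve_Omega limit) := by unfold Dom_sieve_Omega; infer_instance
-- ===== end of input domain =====

-- B replaces A's per-n while-loop re-factorization by the DP recurrence O[n] = O[n // spf[n]] + 1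
-- (measured faster by a constant factor); return values agree on all limit ≥ 0.

-- ===== PORT A =====

-- int(limit**0.5): exact equality with Nat.sqrt holds on the whole domain 0 ≤ limit ≤ 2^31,
-- where the double sqrt/pow is correctly rounded and far from integer boundaries.
def pvSqrt (limit : Int) : Int := ((Int.toNat limit).sqrt : Int)

-- the inner marking loop 'for j in range(i*i, limit+1, i): if spf[j] == j: spf[j] = i'
-- (this line is textually identical in Source A and Source B, so both ports share it)
def markMultiples (limit i : Int) (spf : List Int) : List Int :=
  (PySem.List.pyRange (i*i) (limit+1) i).foldl
    (fun spf j => if PySem.List.pyGetD spf j 0 == j then PySem.List.pySetD spf j i else spf) spf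

-- A's sieve: for i in range(2, int(limit**0.5)+1): if spf[i] == i: <mark multiples>
def sieveA (limit : Int) : List Int :=
  (PySem.List.pyRange 2 (pvSqrt limit + 1) 1).foldl
    (fun spf i => if PySem.List.pyGetD spf i 0 == i then markMultiples limit i spf else spf)
    (PySem.List.pyRange 0 (limit+1) 1)

-- 'while m > 1: O[n] += 1; m //= spf[m]' — fuel-bounded (fuel n.toNat suffices: m strictly decreases)
def omegaWhile (spf : List Int) (n : Int) : Nat → List Int → Int → List Int
  | 0, O, _ => O
  | fuel+1, O, m =>
      if 1 < m then
        omegaWhile spf n fuel (PySem.List.pySetD O n (PySem.List.pyGetD O n 0 + 1))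
          (PySem.Int.floordiv m (PySem.List.pyGetD spf m 0))
      else O

def sieve_Omega (limit : Int) : List Int :=
  let spf := sieveA limit
  (PySem.List.pyRange 2 (limit+1) 1).foldl
    (fun O n => omegaWhile spf n n.toNat O n)
    (List.replicate (limit+1).toNat 0)

-- ===== PORT B =====

-- B's sieve loop: 'i = 2; while i*i <= limit: (if spf[i]==i: <mark multiples>); i += 1'
-- fuel-bounded; fuel (limit+1).toNat suffices since the loop stops once i exceeds sqrt(limit) ≤ limit
def sieveBLoop (limit : Int) : Nat → Int → List Int → List Int
  | 0, _, spf => spf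
  | fuel+1, i, spf =>
      if i * i ≤ limit then
        sieveBLoop limit fuel (i+1)
          (if PySem.List.pyGetD spf i 0 == i then markMultiples limit i spf else spf)
      else spf

def sieve_Omega_alt (limit : Int) : List Int :=
  let spf := sieveBLoop limit (limit+1).toNat 2 (PySem.List.pyRange 0 (limit+1) 1)
  (PySem.List.pyRange 2 (limit+1) 1).foldl
    (fun O n =>
      PySem.List.pySetD O n
        (PySem.List.pyGetD O (PySem.Int.floordiv n (PySem.List.pyGetD spf n 0)) 0 + 1))
    (List.replicate (limit+1).toNat 0)

-- ===== PRECONDITION & SPEC =====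
-- Pre_ excludes exactly the negative limits, on which Python A raises TypeError (limit**0.5 is complex).
def Pre_sieve_Omega (limit : Int) : Prop := 0 ≤ limit
instance (limit : Int) : Decidable (Pre_sieve_Omega limit) := by unfold Pre_sieve_Omega; infer_instance
def pvWitness_sieve_Omega : Int := (10)

def Spec_sieve_Omega (limit : Int) (out : List Int) : Prop := out = sieve_Omega_alt limit
instance (limit : Int) (out : List Int) : Decidable (Spec_sieve_Omega limit out) := by unfold Spec_sieve_Omega; infer_instance

-- ===== CLAIM (what is proved, stated in full; the proofs are below) =====
def Claim_equal_sieve_Omega : Prop := ∀ (limit : Int), Dom_sieve_Omega limit → Pre_sieve_Omega limit → Spec_sieve_Omega limit (sieve_Omega limit)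
-- ===== LEMMAS AND PROOFS =====

-- the pure while-loop count: number of divisions by spf[m] until m reaches 1 (fuel-bounded)
def wcF (spf : List Int) : Nat → Int → Int
  | 0, _ => 0
  | fuel+1, m =>
      if 1 < m then wcF spf fuel (PySem.Int.floordiv m (PySem.List.pyGetD spf m 0)) + 1 else 0

-- index arithmetic: pyGetD after pySetD at nonnegative Int indices
theorem pv_getD_setD (xs : List Int) (j m v : Int) (hj0 : 0 ≤ j) (hj : j < (xs.length : Int))
    (hm : 0 ≤ m) :
    PySem.List.pyGetD (PySem.List.pySetD xs j v) m 0 = if m = j then v else PySem.List.pyGetD xs m 0 := by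
  have hjj : j = ((j.toNat : Nat) : Int) := (Int.toNat_of_nonneg hj0).symm
  have hmm : m = ((m.toNat : Nat) : Int) := (Int.toNat_of_nonneg hm).symm
  rw [hjj, hmm, PySem.List.pyGetD_pySetD_natCast xs j.toNat m.toNat v 0 (by omega)]
  by_cases h : m = j
  · rw [if_pos (show m.toNat = j.toNat by omega), if_pos (by rw [← hjj, ← hmm]; exact h)]
  · rw [if_neg (show ¬ m.toNat = j.toNat by omega), if_neg (by rw [← hjj, ← hmm]; exact h), ← hmm]

theorem pv_getD_replicate (n : Nat) (k : Int) :
    PySem.List.pyGetD (List.replicate n (0 : Int)) k 0 = 0 := by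
  rcases h : PySem.List.pyGet? (List.replicate n (0 : Int)) k with _ | x
  · exact PySem.List.pyGetD_of_none _ _ _ h
  · have hx : x ∈ List.replicate n (0 : Int) := PySem.List.mem_of_pyGet?_eq_some _ h
    have hx0 : x = 0 := List.eq_of_mem_replicate hx
    simp [PySem.List.pyGetD, h, hx0]

-- i*i ≤ limit ↔ i < pvSqrt limit + 1, for 0 ≤ i and 0 ≤ limit
theorem pv_sqrt_iff (limit i : Int) (hl : 0 ≤ limit) (hi : 0 ≤ i) :
    i * i ≤ limit ↔ i < pvSqrt limit + 1 := by
  have hcast : ((i.toNat * i.toNat : Nat) : Int) = i * i := by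
    push_cast [Int.toNat_of_nonneg hi]; ring
  have h1 : i * i ≤ limit ↔ i.toNat * i.toNat ≤ limit.toNat := by omega
  have h2 : i.toNat * i.toNat ≤ limit.toNat ↔ i.toNat ≤ (Int.toNat limit).sqrt := Nat.le_sqrt.symm
  unfold pvSqrt
  omega

-- B's fuel-bounded while sieve IS A's fold over range(2, int(limit**0.5)+1)
theorem pv_sieveB_eq_fold (limit : Int) (hl : 0 ≤ limit) :
    ∀ (fuel : Nat) (i : Int) (spf : List Int), 2 ≤ i →
      (pvSqrt limit + 1 - i).toNat ≤ fuel →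
      sieveBLoop limit fuel i spf =
        (PySem.List.pyRange i (pvSqrt limit + 1) 1).foldl
          (fun spf i => if PySem.List.pyGetD spf i 0 == i then markMultiples limit i spf else spf) spf := by
  intro fuel
  induction fuel with
  | zero =>
      intro i spf hi hf
      rw [PySem.List.pyRange_one_eq_nil (by omega)]
      simp [sieveBLoop]
  | succ fuel ih =>
      intro i spf hi hf
      by_cases h : i * i ≤ limit
      · have hlt : i < pvSqrt limit + 1 := (pv_sqrt_iff limit i hl (by omega)).mp h
        rw [PySem.List.pyRange_one_cons hlt]
        simp only [sieveBLoop, if_pos h, List.foldl_cons]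
        exact ih (i+1) _ (by omega) (by omega)
      · have hge : pvSqrt limit + 1 ≤ i := by
          by_contra hc
          exact h ((pv_sqrt_iff limit i hl (by omega)).mpr (by omega))
        rw [PySem.List.pyRange_one_eq_nil hge]
        simp [sieveBLoop, h]

theorem pv_sieveB_eq_sieveA (limit : Int) (hl : 0 ≤ limit) :
    sieveBLoop limit (limit+1).toNat 2 (PySem.List.pyRange 0 (limit+1) 1) = sieveA limit := by
  have hs : (Int.toNat limit).sqrt ≤ limit.toNat := Nat.sqrt_le_self _
  exact pv_sieveB_eq_fold limit hl _ 2 _ (by omega) (by unfold pvSqrt; omega)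

-- the sieve invariant: entries are either still the index itself or a value in [2, index]
def SpfInv (limit : Int) (spf : List Int) : Prop :=
  spf.length = (limit+1).toNat ∧
  ∀ m : Int, 0 ≤ m → m ≤ limit →
    (PySem.List.pyGetD spf m 0 = m ∨
     (2 ≤ PySem.List.pyGetD spf m 0 ∧ PySem.List.pyGetD spf m 0 ≤ m))

theorem pv_markMultiples_inv (limit i : Int) (hi : 2 ≤ i) (spf : List Int)
    (h : SpfInv limit spf) : SpfInv limit (markMultiples limit i spf) := by
  unfold markMultiples
  refine List.foldlRecOn _ _ h ?_
  intro spf hspf j hj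
  obtain ⟨hjlo, hjhi, -⟩ := (PySem.List.mem_pyRange_iff_of_pos (by omega) j).mp hj
  have hij : i ≤ i * i := by nlinarith
  by_cases hcond : PySem.List.pyGetD spf j 0 == j
  · simp only [if_pos hcond]
    obtain ⟨hlen, hent⟩ := hspf
    refine ⟨by rw [PySem.List.length_pySetD]; exact hlen, ?_⟩
    intro m hm0 hml
    rw [pv_getD_setD spf j m i (by omega) (by omega) hm0]
    by_cases hmj : m = j
    · simp only [if_pos hmj]; right; omega
    · simp only [if_neg hmj]; exact hent m hm0 hml
  · simp only [if_neg hcond]; exact hspf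

theorem pv_sieveA_inv (limit : Int) (hl : 0 ≤ limit) : SpfInv limit (sieveA limit) := by
  unfold sieveA
  have hbase : SpfInv limit (PySem.List.pyRange 0 (limit+1) 1) := by
    constructor
    · rw [PySem.List.length_pyRange_one]; omega
    · intro m hm0 hml
      left
      have hlen : m < ((PySem.List.pyRange 0 (limit+1) 1).length : Int) := by
        rw [PySem.List.length_pyRange_one]; omega
      rw [PySem.List.pyGetD_eq_getElem _ 0 hm0 hlen, PySem.List.getElem_pyRange_one]
      omega
  refine List.foldlRecOn _ _ hbase ?_
  intro spf hspf i hi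
  have hi2 : 2 ≤ i := ((PySem.List.mem_pyRange_one).mp hi).1
  by_cases hcond : PySem.List.pyGetD spf i 0 == i
  · simp only [if_pos hcond]; exact pv_markMultiples_inv limit i hi2 spf hspf
  · simp only [if_neg hcond]; exact hspf

-- for 2 ≤ m ≤ limit the quotient m // spf[m] lies strictly between 0 and m
theorem pv_quot_facts (limit : Int) (spf : List Int) (hinv : SpfInv limit spf)
    (m : Int) (hm : 2 ≤ m) (hml : m ≤ limit) :
    1 ≤ PySem.Int.floordiv m (PySem.List.pyGetD spf m 0) ∧
    PySem.Int.floordiv m (PySem.List.pyGetD spf m 0) < m := by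
  obtain ⟨hs2, hsm⟩ : 2 ≤ PySem.List.pyGetD spf m 0 ∧ PySem.List.pyGetD spf m 0 ≤ m := by
    rcases hinv.2 m (by omega) hml with h | h
    · omega
    · omega
  set s := PySem.List.pyGetD spf m 0 with hs
  set q := PySem.Int.floordiv m s with hq
  obtain ⟨h1, h2⟩ := (PySem.Int.floordiv_eq_iff_of_pos (by omega)).mp hq.symm
  constructor
  · nlinarith
  · nlinarith

-- the while-count does not depend on the fuel once the fuel is at least m
theorem pv_wcF_fuel (limit : Int) (spf : List Int) (hinv : SpfInv limit spf) :
    ∀ (mN : Nat) (m : Int) (fuel : Nat), m.toNat = mN → 1 ≤ m → m ≤ limit → m.toNat ≤ fuel →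
      wcF spf fuel m = wcF spf m.toNat m := by
  intro mN
  induction mN using Nat.strong_induction_on with
  | _ mN ih =>
    intro m fuel hmN hm1 hml hfuel
    by_cases hm : 1 < m
    · obtain ⟨hq1, hqm⟩ := pv_quot_facts limit spf hinv m (by omega) hml
      set m' := PySem.Int.floordiv m (PySem.List.pyGetD spf m 0) with hm'
      obtain ⟨g, rfl⟩ : ∃ g, fuel = g + 1 := ⟨fuel - 1, by omega⟩
      obtain ⟨t, ht⟩ : ∃ t, m.toNat = t + 1 := ⟨m.toNat - 1, by omega⟩
      rw [ht]
      simp only [wcF, if_pos hm]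
      have e1 : wcF spf g m' = wcF spf m'.toNat m' :=
        ih m'.toNat (by omega) m' g rfl (by omega) (by omega) (by omega)
      have e2 : wcF spf t m' = wcF spf m'.toNat m' :=
        ih m'.toNat (by omega) m' t rfl (by omega) (by omega) (by omega)
      rw [e1, e2]
    · have hm1' : m = 1 := by omega
      subst hm1'
      obtain ⟨g, rfl⟩ : ∃ g, fuel = g + 1 := ⟨fuel - 1, by omega⟩
      simp [wcF]

-- A's while loop writes O[n] + (while count of m) at index n and changes nothing else
theorem pv_omegaWhile_eq (limit : Int) (spf : List Int) (hinv : SpfInv limit spf) :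
    ∀ (mN : Nat) (m : Int) (fuel : Nat) (O : List Int) (n : Int),
      m.toNat = mN → 2 ≤ m → m ≤ limit → m.toNat ≤ fuel →
      0 ≤ n → n < (O.length : Int) →
      omegaWhile spf n fuel O m =
        PySem.List.pySetD O n (PySem.List.pyGetD O n 0 + wcF spf m.toNat m) := by
  intro mN
  induction mN using Nat.strong_induction_on with
  | _ mN ih =>
    intro m fuel O n hmN hm2 hml hfuel hn0 hnlen
    obtain ⟨hq1, hqm⟩ := pv_quot_facts limit spf hinv m (by omega) hml
    set m' := PySem.Int.floordiv m (PySem.List.pyGetD spf m 0) with hm'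
    obtain ⟨g, rfl⟩ : ∃ g, fuel = g + 1 := ⟨fuel - 1, by omega⟩
    obtain ⟨t, ht⟩ : ∃ t, m.toNat = t + 1 := ⟨m.toNat - 1, by omega⟩
    have hm1 : (1:Int) < m := by omega
    set O' := PySem.List.pySetD O n (PySem.List.pyGetD O n 0 + 1) with hO'
    have hO'len : O'.length = O.length := by rw [hO', PySem.List.length_pySetD]
    have hO'n : PySem.List.pyGetD O' n 0 = PySem.List.pyGetD O n 0 + 1 := by
      rw [hO', pv_getD_setD O n n _ hn0 hnlen hn0, if_pos rfl]
    have hset : ∀ v : Int, PySem.List.pySetD O' n v = PySem.List.pySetD O n v := by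
      intro v
      rw [hO', PySem.List.pySetD_of_nonneg _ _ hn0, PySem.List.pySetD_of_nonneg _ _ hn0,
        PySem.List.pySetD_of_nonneg _ _ hn0, List.set_set]
    have hwc : wcF spf m.toNat m = wcF spf m'.toNat m' + 1 := by
      rw [ht]
      simp only [wcF, if_pos hm1]
      rw [pv_wcF_fuel limit spf hinv m'.toNat m' t rfl (by omega) (by omega) (by omega)]
    simp only [omegaWhile, if_pos hm1]
    by_cases hm'2 : 2 ≤ m'
    · rw [show omegaWhile spf n g
          (PySem.List.pySetD O n (PySem.List.pyGetD O n 0 + 1)) m' =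
          PySem.List.pySetD O' n (PySem.List.pyGetD O' n 0 + wcF spf m'.toNat m') from
          ih m'.toNat (by omega) m' g O' n rfl hm'2 (by omega) (by omega) hn0 (by omega)]
      rw [hO'n, hset, hwc]
      ring_nf
    · have hm'1 : m' = 1 := by omega
      have hstop : omegaWhile spf n g O' 1 = O' := by
        cases g <;> simp [omegaWhile]
      rw [show PySem.List.pySetD O n (PySem.List.pyGetD O n 0 + 1) = O' from rfl]
      rw [← hm', hm'1, hstop, hwc, hm'1]
      have : wcF spf (1:Int).toNat 1 = 0 := by simp [wcF]
      rw [this, hO']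
      norm_num

-- the main loop: A's fold over range(2, limit+1) equals B's DP fold
theorem pv_fold_eq (limit : Int) (hl : 0 ≤ limit) (spf : List Int) (hinv : SpfInv limit spf) :
    ∀ (fuel : Nat) (a : Int) (L : List Int), 2 ≤ a →
      (limit + 1 - a).toNat ≤ fuel →
      L.length = (limit+1).toNat →
      (∀ k : Int, 1 ≤ k → k < a → PySem.List.pyGetD L k 0 = wcF spf k.toNat k) →
      (∀ k : Int, a ≤ k → k ≤ limit → PySem.List.pyGetD L k 0 = 0) →
      (PySem.List.pyRange a (limit+1) 1).foldl (fun O n => omegaWhile spf n n.toNat O n) L =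
      (PySem.List.pyRange a (limit+1) 1).foldl
        (fun O n => PySem.List.pySetD O n
          (PySem.List.pyGetD O (PySem.Int.floordiv n (PySem.List.pyGetD spf n 0)) 0 + 1)) L := by
  intro fuel
  induction fuel with
  | zero =>
      intro a L ha hf _ _ _
      rw [PySem.List.pyRange_one_eq_nil (by omega)]
      rfl
  | succ fuel ih =>
      intro a L ha hf hlen hdone hzero
      by_cases hrange : a ≤ limit
      · rw [PySem.List.pyRange_one_cons (by omega)]
        simp only [List.foldl_cons]
        obtain ⟨hq1, hqa⟩ := pv_quot_facts limit spf hinv a ha hrange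
        set a' := PySem.Int.floordiv a (PySem.List.pyGetD spf a 0) with ha'
        have halen : a < (L.length : Int) := by omega
        -- A's step
        have hA : omegaWhile spf a a.toNat L a =
            PySem.List.pySetD L a (wcF spf a.toNat a) := by
          rw [pv_omegaWhile_eq limit spf hinv a.toNat a a.toNat L a rfl ha hrange le_rfl
            (by omega) halen, hzero a le_rfl hrange]
          norm_num
        -- B's step writes the same value
        have hB : PySem.List.pyGetD L a' 0 + 1 = wcF spf a.toNat a := by
          obtain ⟨t, ht⟩ : ∃ t, a.toNat = t + 1 := ⟨a.toNat - 1, by omega⟩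
          rw [hdone a' hq1 hqa, ht]
          simp only [wcF, if_pos (show (1:Int) < a by omega)]
          rw [pv_wcF_fuel limit spf hinv a'.toNat a' t rfl (by omega) (by omega) (by omega)]
        rw [hA, hB]
        set L' := PySem.List.pySetD L a (wcF spf a.toNat a) with hL'
        have hL'len : L'.length = (limit+1).toNat := by
          rw [hL', PySem.List.length_pySetD]; exact hlen
        refine ih (a+1) L' (by omega) (by omega) hL'len ?_ ?_
        · intro k hk1 hka
          rw [hL', pv_getD_setD L a k _ (by omega) halen (by omega)]
          by_cases hka' : k = a
          · simp [hka']
          · rw [if_neg hka']; exact hdone k hk1 (by omega)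
        · intro k hk1 hkl
          rw [hL', pv_getD_setD L a k _ (by omega) halen (by omega),
            if_neg (by omega)]
          exact hzero k (by omega) hkl
      · rw [PySem.List.pyRange_one_eq_nil (by omega)]
        rfl

-- ===== VERDICT (by name: the statement is the Claim_ definition above) =====
theorem sieve_Omega_spec : Claim_equal_sieve_Omega := by
  intro limit _ hpre
  unfold Spec_sieve_Omega sieve_Omega sieve_Omega_alt
  rw [pv_sieveB_eq_sieveA limit hpre]
  exact pv_fold_eq limit hpre (sieveA limit) (pv_sieveA_inv limit hpre)
    (limit - 1).toNat 2 _ le_rfl (by omega) (by simp) 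
    (fun k hk1 hk2 => by
      have : k = 1 := by omega
      subst this
      rw [pv_getD_replicate]
      simp [wcF])
    (fun k hk1 hk2 => pv_getD_replicate _ _)
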